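-- pv_equiv track=rewrite | github.com/marek-cz/Diagnostyka_AUE | Python/GUI_backend.py | grupujUszkodzeniaWSlowniku
-- ===== SOURCE A (Python) =====
-- def grupujUszkodzeniaWSlowniku(slownik, grupy_niejednoznacznosci):
--     nowy_slownik = {}
--     for uszkodzenie in slownik :
--         czy_nalezy, grupa = CzyUszkodzenieJestWGrupie(uszkodzenie, grupy_niejednoznacznosci)
--         if ( czy_nalezy ):
--             # jezeli uszkodzenie znajduje sie w grupie niejednoznacznosci
--             if grupa in nowy_slownik : continue # jezlei taka etykieta juz jest w slowniku to nie dodajemy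
--             else : nowy_slownik[grupa] = slownik[uszkodzenie]
--         else :
--             nowy_slownik[uszkodzenie] = slownik[uszkodzenie] # kiedy uszkodzenie nie nalezy do zadnej grupy
--
--     return nowy_slownik
--
-- def CzyUszkodzenieJestWGrupie(uszkodzenie, grupy_niejednoznacznosci):
--     """
--     Zwraca zmienna boolowska oraz ewentualna grupe do ktorej
--     nalezy uszkodzenie
--     """
--     for grupa in grupy_niejednoznacznosci:
--         if ( grupa.find( uszkodzenie ) != -1 ) : return (True, grupa)
--
--     return (False, '')
-- ===== SOURCE B (Python) =====
-- def grupujUszkodzeniaWSlowniku(slownik, grupy_niejednoznacznosci):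
--     # Precompute: for each key, the first group (in group order) containing it.
--     assigned = {}
--     for grupa in grupy_niejednoznacznosci:
--         for klucz in slownik:
--             if klucz not in assigned and grupa.find(klucz) != -1:
--                 assigned[klucz] = grupa
--     nowy_slownik = {}
--     for klucz, wartosc in slownik.items():
--         if klucz in assigned:
--             nowy_slownik.setdefault(assigned[klucz], wartosc)
--         else:
--             nowy_slownik[klucz] = wartosc
--     return nowy_slownik
-- ===== Notes on version B (the rewrite author's own statement) =====
-- stated objective: alternative
-- what changed: Replaces the per-key helper scan over groups with a precomputed key-to-first-matching-group assignment table (groups outer, keys inner) followed by a second pass that builds the result with setdefault.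
import Mathlib
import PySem

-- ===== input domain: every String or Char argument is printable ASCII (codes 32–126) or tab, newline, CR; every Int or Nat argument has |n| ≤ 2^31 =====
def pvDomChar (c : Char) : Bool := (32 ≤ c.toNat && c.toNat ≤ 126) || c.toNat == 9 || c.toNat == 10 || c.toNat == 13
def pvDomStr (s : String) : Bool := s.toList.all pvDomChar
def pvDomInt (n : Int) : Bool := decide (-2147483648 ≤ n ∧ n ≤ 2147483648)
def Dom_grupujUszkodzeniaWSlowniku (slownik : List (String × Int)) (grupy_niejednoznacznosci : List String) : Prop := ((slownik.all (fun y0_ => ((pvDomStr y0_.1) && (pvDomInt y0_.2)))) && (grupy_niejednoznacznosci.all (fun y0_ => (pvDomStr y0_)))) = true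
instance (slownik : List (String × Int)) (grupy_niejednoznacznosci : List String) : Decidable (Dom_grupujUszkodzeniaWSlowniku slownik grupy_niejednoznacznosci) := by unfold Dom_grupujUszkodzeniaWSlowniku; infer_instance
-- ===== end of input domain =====

-- B replaces the per-key helper scan over groups by a precomputed key→first-matching-group
-- table plus a second setdefault pass (alternative decomposition, same cost).


-- ===== PORT A =====
-- helper CzyUszkodzenieJestWGrupie: first group whose .find(uszkodzenie) != -1
def czyUszkodzenieJestWGrupie (uszkodzenie : String) : List String → Bool × String
  | [] => (false, "")
  | grupa :: gs =>
      if PySem.Str.find grupa uszkodzenie ≠ -1 then (true, grupa)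
      else czyUszkodzenieJestWGrupie uszkodzenie gs

def grupujUszkodzeniaWSlowniku (slownik : List (String × Int)) (grupy_niejednoznacznosci : List String) : List (String × Int) :=
  (slownik.foldl (fun nowy kv =>
      let r := czyUszkodzenieJestWGrupie kv.1 grupy_niejednoznacznosci
      if r.1 then
        (if nowy.contains r.2 then nowy else nowy.insert r.2 kv.2)
      else nowy.insert kv.1 kv.2)
    PySem.Dict.empty).items

-- ===== PORT B =====
def pvAssigned (slownik : List (String × Int)) (grupy_niejednoznacznosci : List String) : PySem.Dict String String :=
  grupy_niejednoznacznosci.foldl (fun a grupa =>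
      slownik.foldl (fun a kv =>
        if a.contains kv.1 = false ∧ PySem.Str.find grupa kv.1 ≠ -1 then a.insert kv.1 grupa else a) a)
    PySem.Dict.empty

def grupujUszkodzeniaWSlowniku_alt (slownik : List (String × Int)) (grupy_niejednoznacznosci : List String) : List (String × Int) :=
  let assigned := pvAssigned slownik grupy_niejednoznacznosci
  (slownik.foldl (fun nowy kv =>
      match assigned.get? kv.1 with
      | some grupa => nowy.setdefault grupa kv.2
      | none => nowy.insert kv.1 kv.2)
    PySem.Dict.empty).items

-- ===== PRECONDITION & SPEC =====
def Spec_grupujUszkodzeniaWSlowniku (slownik : List (String × Int)) (grupy_niejednoznacznosci : List String) (out : List (String × Int)) : Prop := out = grupujUszkodzeniaWSlowniku_alt slownik grupy_niejednoznacznosci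
instance (slownik : List (String × Int)) (grupy_niejednoznacznosci : List String) (out : List (String × Int)) : Decidable (Spec_grupujUszkodzeniaWSlowniku slownik grupy_niejednoznacznosci out) := by unfold Spec_grupujUszkodzeniaWSlowniku; infer_instance

-- ===== CLAIM (what is proved, stated in full; the proofs are below) =====
def Claim_equal_grupujUszkodzeniaWSlowniku : Prop := ∀ (slownik : List (String × Int)) (grupy_niejednoznacznosci : List String), Dom_grupujUszkodzeniaWSlowniku slownik grupy_niejednoznacznosci → Spec_grupujUszkodzeniaWSlowniku slownik grupy_niejednoznacznosci (grupujUszkodzeniaWSlowniku slownik grupy_niejednoznacznosci)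

-- ===== LEMMAS AND PROOFS =====

-- first group (in order) containing k, as an Option
def firstGroup? (grupy : List String) (k : String) : Option String :=
  match grupy with
  | [] => none
  | g :: gs => if PySem.Str.find g k ≠ -1 then some g else firstGroup? gs k

lemma czy_eq_firstGroup (k : String) (grupy : List String) :
    czyUszkodzenieJestWGrupie k grupy =
      match firstGroup? grupy k with
      | some g => (true, g)
      | none => (false, "") := by
  induction grupy with
  | nil => rfl
  | cons g gs ih =>
      simp only [czyUszkodzenieJestWGrupie, firstGroup?]
      split_ifs with h <;> simp [ih]

lemma inner_get (g : String) (slownik : List (String × Int))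
    (a : PySem.Dict String String) (k : String) :
    (slownik.foldl (fun a kv =>
        if a.contains kv.1 = false ∧ PySem.Str.find g kv.1 ≠ -1 then a.insert kv.1 g else a) a).get? k
    = if a.get? k = none ∧ k ∈ slownik.map Prod.fst ∧ PySem.Str.find g k ≠ -1
      then some g else a.get? k := by
  induction slownik generalizing a with
  | nil => simp
  | cons kv rest ih =>
      simp only [List.foldl_cons, List.map_cons, List.mem_cons]
      rw [ih]
      by_cases hc : (a.contains kv.1 = false ∧ PySem.Str.find g kv.1 ≠ -1)
      · rw [if_pos hc]
        by_cases hk : k = kv.1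
        · have hn : a.get? kv.1 = none := (PySem.Dict.get?_eq_none_iff_contains _ _).mpr hc.1
          have hf2 : ¬ PySem.Chars.find g.toList kv.1.toList = -1 := by simpa using hc.2
          have hins : (a.insert kv.1 g).get? kv.1 = some g := PySem.Dict.get?_insert_self a kv.1 g
          simp [hk, hn, hf2, hins]
        · rw [PySem.Dict.get?_insert_of_ne a g hk]
          split_ifs with h1 h2 <;> tauto
      · rw [if_neg hc]
        by_cases hk : k = kv.1
        · by_cases hf : PySem.Str.find g k ≠ -1
          · have hct : a.contains kv.1 = true := by
              cases h : a.contains kv.1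
              · exact absurd ⟨h, hk ▸ hf⟩ hc
              · rfl
            have hg : ¬ a.get? k = none := by
              intro h
              rw [hk, PySem.Dict.get?_eq_none_iff_contains, hct] at h
              cases h
            simp [hg]
          · have hf2 : PySem.Chars.find g.toList k.toList = -1 := by
              simpa using not_not.mp hf
            simp [hf2]
        · split_ifs with h1 h2 <;> tauto

lemma assigned_get (slownik : List (String × Int)) (grupy : List String) (k : String)
    (hk : k ∈ slownik.map Prod.fst) :
    (pvAssigned slownik grupy).get? k = firstGroup? grupy k := by
  have gen : ∀ (gs : List String) (a : PySem.Dict String String),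
      (gs.foldl (fun a grupa =>
        slownik.foldl (fun a kv =>
          if a.contains kv.1 = false ∧ PySem.Str.find grupa kv.1 ≠ -1 then a.insert kv.1 grupa else a) a) a).get? k
      = if a.get? k = none then
          (match firstGroup? gs k with
           | some g => some g
           | none => a.get? k)
        else a.get? k := by
    intro gs
    induction gs with
    | nil => intro a; simp [firstGroup?]
    | cons g rest ih =>
        intro a
        simp only [List.foldl_cons]
        rw [ih, inner_get]
        simp only [firstGroup?]
        by_cases h0 : a.get? k = none
        · by_cases hf : PySem.Str.find g k ≠ -1
          · have hf' : ¬ PySem.Chars.find g.toList k.toList = -1 := by simpa using hf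
            simp [h0, hk, hf']
          · have hf' : PySem.Chars.find g.toList k.toList = -1 := by
              simpa using not_not.mp hf
            cases hrest : firstGroup? rest k <;> simp [h0, hk, hf']
        · simp [h0]
  have h := gen grupy PySem.Dict.empty
  simp only [pvAssigned]
  rw [h]
  simp only [PySem.Dict.get?_empty, if_pos rfl]
  cases firstGroup? grupy k <;> simp

theorem ports_agree (slownik : List (String × Int)) (grupy : List String) :
    grupujUszkodzeniaWSlowniku slownik grupy = grupujUszkodzeniaWSlowniku_alt slownik grupy := by
  unfold grupujUszkodzeniaWSlowniku grupujUszkodzeniaWSlowniku_alt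
  congr 1
  apply PySem.List.foldl_congr_mem
  intro nowy kv hmem
  have hk : kv.1 ∈ slownik.map Prod.fst := List.mem_map_of_mem hmem
  rw [czy_eq_firstGroup, assigned_get slownik grupy kv.1 hk]
  cases h : firstGroup? grupy kv.1 with
  | none => simp
  | some g =>
      simp only
      cases hc : nowy.contains g with
      | true => simp [PySem.Dict.setdefault_of_contains _ _ hc]
      | false => simp [PySem.Dict.setdefault_of_not_contains _ _ hc]

-- ===== VERDICT (by name: the statement is the Claim_ definition above) =====
theorem grupujUszkodzeniaWSlowniku_spec : Claim_equal_grupujUszkodzeniaWSlowniku := by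
  intro slownik grupy _
  unfold Spec_grupujUszkodzeniaWSlowniku
  exact ports_agree slownik grupy
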